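-- pv_equiv track=rewrite | github.com/AmanS3109/ChessieBot | streamlit_app.py | normalize_for_tts
-- ===== SOURCE A (Python) =====
-- def normalize_for_tts(text: str) -> str:
--     replacements = {
--         "kise": "kisse",
--         "kon": "kaun",
--         "kehte": "kehtey",
--         "kyun": "kyon",
--         "raja": "raajaa",
--         "bulate": "bulaate",
--     }
--     out = text.lower()
--     for k, v in replacements.items():
--         out = out.replace(k, v)
--     return out
-- ===== SOURCE B (Python) =====
-- def normalize_for_tts(text: str) -> str:
--     # single left-to-right scan substituting all six fixed patterns simultaneously
--     pairs = (("kise", "kisse"), ("kon", "kaun"), ("kehte", "kehtey"),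
--              ("kyun", "kyon"), ("raja", "raajaa"), ("bulate", "bulaate"))
--     s = text.lower()
--     parts = []
--     i = 0
--     n = len(s)
--     while i < n:
--         for k, v in pairs:
--             if s.startswith(k, i):
--                 parts.append(v)
--                 i += len(k)
--                 break
--         else:
--             parts.append(s[i])
--             i += 1
--     return "".join(parts)
-- ===== Notes on version B (the rewrite author's own statement) =====
-- stated objective: alternative
-- what changed: B lowercases once and then makes a single left-to-right scan that substitutes all six fixed patterns simultaneously (trying the keys at each position), instead of A's six sequential full-string replace passes; this is exact because no key overlaps another and no replacement value recreates a later key.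
import Mathlib
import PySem

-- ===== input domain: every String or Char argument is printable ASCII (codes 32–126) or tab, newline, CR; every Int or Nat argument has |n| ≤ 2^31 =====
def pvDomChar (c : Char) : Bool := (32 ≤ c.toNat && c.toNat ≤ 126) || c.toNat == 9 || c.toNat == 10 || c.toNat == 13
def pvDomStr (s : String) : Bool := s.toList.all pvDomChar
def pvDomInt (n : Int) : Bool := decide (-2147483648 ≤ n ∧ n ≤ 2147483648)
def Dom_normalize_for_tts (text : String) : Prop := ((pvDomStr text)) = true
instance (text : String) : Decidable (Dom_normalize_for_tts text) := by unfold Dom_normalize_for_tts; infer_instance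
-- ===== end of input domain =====

-- B replaces the six sequential full-string .replace passes by ONE left-to-right scan that
-- substitutes all six patterns simultaneously (alternative decomposition; same result since
-- no key overlaps another and no value re-creates a later key).

-- ===== PORT A =====
def normalize_for_tts (text : String) : String :=
  let replacements : PySem.Dict String String :=
    PySem.Dict.ofList
      [("kise", "kisse"), ("kon", "kaun"), ("kehte", "kehtey"),
       ("kyun", "kyon"), ("raja", "raajaa"), ("bulate", "bulaate")]
  let out := PySem.Str.lower text
  replacements.items.foldl (fun out kv => PySem.Str.replace out kv.1 kv.2) out

-- ===== PORT B =====
-- Source B's single scan: at each position try the six keys in dict order (startswith),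
-- emit the value and skip the key on a hit, otherwise emit the character and advance.
def pvScanB : List Char → List Char
  | [] => []
  | c :: t =>
    if "kise".toList.isPrefixOf (c :: t) then "kisse".toList ++ pvScanB (t.drop 3)
    else if "kon".toList.isPrefixOf (c :: t) then "kaun".toList ++ pvScanB (t.drop 2)
    else if "kehte".toList.isPrefixOf (c :: t) then "kehtey".toList ++ pvScanB (t.drop 4)
    else if "kyun".toList.isPrefixOf (c :: t) then "kyon".toList ++ pvScanB (t.drop 3)
    else if "raja".toList.isPrefixOf (c :: t) then "raajaa".toList ++ pvScanB (t.drop 3)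
    else if "bulate".toList.isPrefixOf (c :: t) then "bulaate".toList ++ pvScanB (t.drop 5)
    else c :: pvScanB t
  termination_by l => l.length
  decreasing_by all_goals (simp [List.length_drop]; try omega)

def normalize_for_tts_alt (text : String) : String :=
  String.ofList (pvScanB (PySem.Chars.lower text.toList))

-- ===== PRECONDITION & SPEC =====
def Spec_normalize_for_tts (text : String) (out : String) : Prop := out = normalize_for_tts_alt text
instance (text : String) (out : String) : Decidable (Spec_normalize_for_tts text out) := by unfold Spec_normalize_for_tts; infer_instance

-- ===== CLAIM (what is proved, stated in full; the proofs are below) =====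
def Claim_equal_normalize_for_tts : Prop := ∀ (text : String), Dom_normalize_for_tts text → Spec_normalize_for_tts text (normalize_for_tts text)

-- ===== LEMMAS AND PROOFS =====

-- structural model of PySem.Chars.replace (nonempty pattern)
def pvRep (old new : List Char) : List Char → List Char
  | [] => []
  | c :: t =>
    if old.isPrefixOf (c :: t) then new ++ pvRep old new (t.drop (old.length - 1))
    else c :: pvRep old new t
  termination_by l => l.length
  decreasing_by all_goals (simp [List.length_drop]; try omega)

theorem pvGo_eq (old new : List Char) (h : old ≠ []) :
    ∀ fuel l acc, l.length ≤ fuel →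
      PySem.Chars.replace.go old new fuel l acc = acc.reverse ++ pvRep old new l := by
  intro fuel
  induction fuel with
  | zero =>
    intro l acc hl
    have : l = [] := List.eq_nil_of_length_eq_zero (Nat.le_zero.1 hl)
    subst this
    rw [PySem.Chars.replace.go.eq_def]
    simp [pvRep]
  | succ n ih =>
    intro l acc hl
    cases l with
    | nil => rw [PySem.Chars.replace.go.eq_def]; simp [pvRep]
    | cons c t =>
      rw [PySem.Chars.replace.go.eq_def]
      simp only []
      have hlen : 1 ≤ old.length := by
        cases old with
        | nil => exact absurd rfl h
        | cons o ot => simp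
      by_cases hp : old.isPrefixOf (c :: t) = true
      · simp only [hp, if_true]
        rw [ih (List.drop old.length (c :: t)) (new.reverse ++ acc) (by simp [List.length_drop] at hl ⊢; omega)]
        rw [pvRep]
        have hdrop : List.drop old.length (c :: t) = List.drop (old.length - 1) t := by
          cases old with
          | nil => exact absurd rfl h
          | cons o ot => simp
        simp [hp, hdrop]
      · simp only [hp]
        rw [ih t (c :: acc) (by simp at hl; omega)]
        rw [pvRep]
        simp [hp]

theorem pvReplace_eq_rep (old new s : List Char) (h : old ≠ []) :
    PySem.Chars.replace s old new = pvRep old new s := by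
  rw [PySem.Chars.replace, if_neg (by simp [List.isEmpty_iff, h])]
  rw [pvGo_eq old new h s.length s [] le_rfl]
  simp

-- first char is 'k', 'r' or 'b' (every key and every value starts with one)
def pvHeadKRB : List Char → Bool
  | [] => false
  | c :: _ => c == 'k' || c == 'r' || c == 'b'

def pvNoKRB (c : Char) : Bool := !(c == 'k' || c == 'r' || c == 'b')

-- boundary lemma: a replacement passes over a block s it cannot match in or across
theorem pvRep_append (old new s x : List Char) (ho : pvHeadKRB old = true)
    (hs : s.tail.all pvNoKRB = true) (hpre : old.isPrefixOf (s ++ x) = false) :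
    pvRep old new (s ++ x) = s ++ pvRep old new x := by
  induction s with
  | nil => rfl
  | cons c s' ih =>
    have hpre2 : ¬ old.isPrefixOf (c :: (s' ++ x)) = true := by
      rw [List.cons_append] at hpre
      simp [hpre]
    rw [List.cons_append, pvRep, if_neg hpre2]
    cases s' with
    | nil => simp
    | cons c' s'' =>
      have hc' : pvNoKRB c' = true := by
        simp only [List.tail_cons, List.all_cons, Bool.and_eq_true] at hs
        exact hs.1
      cases old with
      | nil => simp [pvHeadKRB] at ho
      | cons o ot =>
        have hoc : (o == c') = false := by
          simp only [pvHeadKRB, Bool.or_eq_true, beq_iff_eq] at ho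
          simp only [pvNoKRB, Bool.not_eq_eq_eq_not, Bool.not_true, Bool.or_eq_false_iff,
            beq_eq_false_iff_ne] at hc'
          rcases ho with (rfl | rfl) | rfl
          · exact beq_eq_false_iff_ne.2 (Ne.symm hc'.1.1)
          · exact beq_eq_false_iff_ne.2 (Ne.symm hc'.1.2)
          · exact beq_eq_false_iff_ne.2 (Ne.symm hc'.2)
        have hpre' : (o :: ot).isPrefixOf ((c' :: s'') ++ x) = false := by
          simp [List.isPrefixOf, hoc]
        have hs' : (c' :: s'').tail.all pvNoKRB = true := by
          simp only [List.tail_cons, List.all_cons, Bool.and_eq_true] at hs ⊢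
          exact hs.2
        rw [List.cons_append] at ih ⊢
        rw [ih hs' hpre']
        simp

-- matching the pattern at the front
theorem pvRep_pos (old new y : List Char) (h : old ≠ []) :
    pvRep old new (old ++ y) = new ++ pvRep old new y := by
  cases old with
  | nil => exact absurd rfl h
  | cons o ot =>
    rw [List.cons_append, pvRep,
      if_pos (List.isPrefixOf_iff_prefix.2 ⟨y, by simp⟩)]
    congr 1
    have : List.drop ((o :: ot).length - 1) (ot ++ y) = y := by
      simp
    rw [this]

-- reflection: a krb-free prefix of the output was already a prefix of the input
theorem pvRep_reflect (old new : List Char) (_ho : pvHeadKRB old = true)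
    (hn : pvHeadKRB new = true) :
    ∀ t (w : List Char), w.all pvNoKRB = true → w.isPrefixOf (pvRep old new t) = true →
      w.isPrefixOf t = true := by
  intro t
  induction t with
  | nil =>
    intro w hw hpre
    simpa [pvRep] using hpre
  | cons c t2 ih =>
    intro w hw hpre
    cases w with
    | nil => simp [List.isPrefixOf]
    | cons d w' =>
      have hd : pvNoKRB d = true := by
        simp only [List.all_cons, Bool.and_eq_true] at hw
        exact hw.1
      by_cases hp : old.isPrefixOf (c :: t2) = true
      · rw [pvRep, if_pos hp] at hpre
        cases new with
        | nil => simp [pvHeadKRB] at hn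
        | cons v vt =>
          exfalso
          rw [List.cons_append] at hpre
          simp only [List.isPrefixOf, Bool.and_eq_true, beq_iff_eq] at hpre
          obtain ⟨rfl, -⟩ := hpre
          simp only [pvHeadKRB, Bool.or_eq_true, beq_iff_eq] at hn
          simp [pvNoKRB] at hd
          rcases hn with (rfl | rfl) | rfl
          · exact hd.1.1 rfl
          · exact hd.1.2 rfl
          · exact hd.2 rfl
      · rw [pvRep, if_neg hp] at hpre
        simp only [List.isPrefixOf, Bool.and_eq_true] at hpre ⊢
        obtain ⟨h1, h2⟩ := hpre
        refine ⟨h1, ?_⟩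
        have hw' : w'.all pvNoKRB = true := by
          simp only [List.all_cons, Bool.and_eq_true] at hw
          exact hw.2
        exact ih w' hw' h2

-- the six sequential replaces as one function
def pvCompA (t : List Char) : List Char :=
  pvRep "bulate".toList "bulaate".toList
    (pvRep "raja".toList "raajaa".toList
      (pvRep "kyun".toList "kyon".toList
        (pvRep "kehte".toList "kehtey".toList
          (pvRep "kon".toList "kaun".toList
            (pvRep "kise".toList "kisse".toList t)))))


-- negative step of pvRep
theorem pvRep_neg (old new : List Char) (c : Char) (t : List Char)
    (h : old.isPrefixOf (c :: t) = false) : pvRep old new (c :: t) = c :: pvRep old new t := by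
  rw [pvRep, if_neg (by simp [h])]

-- a pattern that mismatches s within s's length cannot match across s ++ x
theorem pvNP (p s x : List Char) (h : (p.take s.length).isPrefixOf s = false) :
    p.isPrefixOf (s ++ x) = false := by
  cases hps : p.isPrefixOf (s ++ x) with
  | false => rfl
  | true =>
    exfalso
    rw [List.isPrefixOf_iff_prefix] at hps
    have h1 : p.take s.length <+: s ++ x := (List.take_prefix _ _).trans hps
    have h2 : (p.take s.length).length ≤ s.length := by
      simp [List.length_take]
    have h3 : p.take s.length <+: s := by
      rw [List.prefix_iff_eq_take] at h1
      rw [List.take_append_of_le_length h2] at h1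
      rw [List.prefix_iff_eq_take]
      exact h1
    exact absurd (List.isPrefixOf_iff_prefix.2 h3) (by simp [h])

-- propagating a failed match through one replacement layer
theorem pvStep (p : List Char) (c : Char) (x t2 : List Char)
    (hne : p ≠ [])
    (href : p.tail.isPrefixOf x = true → p.tail.isPrefixOf t2 = true)
    (h : p.isPrefixOf (c :: t2) = false) : p.isPrefixOf (c :: x) = false := by
  cases p with
  | nil => exact absurd rfl hne
  | cons k0 kt =>
    simp only [List.isPrefixOf, Bool.and_eq_false_iff] at h ⊢
    rcases h with h | h
    · exact Or.inl h
    · rcases hx : kt.isPrefixOf x with _ | _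
      · exact Or.inr rfl
      · exact absurd (href hx) (by simp [h])

theorem pvKey1 (x : List Char) : pvCompA ("kise".toList ++ x) = "kisse".toList ++ pvCompA x := by
  unfold pvCompA
  rw [pvRep_pos "kise".toList "kisse".toList _ (by decide)]
  rw [pvRep_append "kon".toList "kaun".toList "kisse".toList _ (by decide) (by decide) (pvNP _ _ _ (by decide))]
  rw [pvRep_append "kehte".toList "kehtey".toList "kisse".toList _ (by decide) (by decide) (pvNP _ _ _ (by decide))]
  rw [pvRep_append "kyun".toList "kyon".toList "kisse".toList _ (by decide) (by decide) (pvNP _ _ _ (by decide))]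
  rw [pvRep_append "raja".toList "raajaa".toList "kisse".toList _ (by decide) (by decide) (pvNP _ _ _ (by decide))]
  rw [pvRep_append "bulate".toList "bulaate".toList "kisse".toList _ (by decide) (by decide) (pvNP _ _ _ (by decide))]

theorem pvKey2 (x : List Char) : pvCompA ("kon".toList ++ x) = "kaun".toList ++ pvCompA x := by
  unfold pvCompA
  rw [pvRep_append "kise".toList "kisse".toList "kon".toList _ (by decide) (by decide) (pvNP _ _ _ (by decide))]
  rw [pvRep_pos "kon".toList "kaun".toList _ (by decide)]
  rw [pvRep_append "kehte".toList "kehtey".toList "kaun".toList _ (by decide) (by decide) (pvNP _ _ _ (by decide))]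
  rw [pvRep_append "kyun".toList "kyon".toList "kaun".toList _ (by decide) (by decide) (pvNP _ _ _ (by decide))]
  rw [pvRep_append "raja".toList "raajaa".toList "kaun".toList _ (by decide) (by decide) (pvNP _ _ _ (by decide))]
  rw [pvRep_append "bulate".toList "bulaate".toList "kaun".toList _ (by decide) (by decide) (pvNP _ _ _ (by decide))]

theorem pvKey3 (x : List Char) : pvCompA ("kehte".toList ++ x) = "kehtey".toList ++ pvCompA x := by
  unfold pvCompA
  rw [pvRep_append "kise".toList "kisse".toList "kehte".toList _ (by decide) (by decide) (pvNP _ _ _ (by decide))]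
  rw [pvRep_append "kon".toList "kaun".toList "kehte".toList _ (by decide) (by decide) (pvNP _ _ _ (by decide))]
  rw [pvRep_pos "kehte".toList "kehtey".toList _ (by decide)]
  rw [pvRep_append "kyun".toList "kyon".toList "kehtey".toList _ (by decide) (by decide) (pvNP _ _ _ (by decide))]
  rw [pvRep_append "raja".toList "raajaa".toList "kehtey".toList _ (by decide) (by decide) (pvNP _ _ _ (by decide))]
  rw [pvRep_append "bulate".toList "bulaate".toList "kehtey".toList _ (by decide) (by decide) (pvNP _ _ _ (by decide))]

theorem pvKey4 (x : List Char) : pvCompA ("kyun".toList ++ x) = "kyon".toList ++ pvCompA x := by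
  unfold pvCompA
  rw [pvRep_append "kise".toList "kisse".toList "kyun".toList _ (by decide) (by decide) (pvNP _ _ _ (by decide))]
  rw [pvRep_append "kon".toList "kaun".toList "kyun".toList _ (by decide) (by decide) (pvNP _ _ _ (by decide))]
  rw [pvRep_append "kehte".toList "kehtey".toList "kyun".toList _ (by decide) (by decide) (pvNP _ _ _ (by decide))]
  rw [pvRep_pos "kyun".toList "kyon".toList _ (by decide)]
  rw [pvRep_append "raja".toList "raajaa".toList "kyon".toList _ (by decide) (by decide) (pvNP _ _ _ (by decide))]
  rw [pvRep_append "bulate".toList "bulaate".toList "kyon".toList _ (by decide) (by decide) (pvNP _ _ _ (by decide))]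

theorem pvKey5 (x : List Char) : pvCompA ("raja".toList ++ x) = "raajaa".toList ++ pvCompA x := by
  unfold pvCompA
  rw [pvRep_append "kise".toList "kisse".toList "raja".toList _ (by decide) (by decide) (pvNP _ _ _ (by decide))]
  rw [pvRep_append "kon".toList "kaun".toList "raja".toList _ (by decide) (by decide) (pvNP _ _ _ (by decide))]
  rw [pvRep_append "kehte".toList "kehtey".toList "raja".toList _ (by decide) (by decide) (pvNP _ _ _ (by decide))]
  rw [pvRep_append "kyun".toList "kyon".toList "raja".toList _ (by decide) (by decide) (pvNP _ _ _ (by decide))]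
  rw [pvRep_pos "raja".toList "raajaa".toList _ (by decide)]
  rw [pvRep_append "bulate".toList "bulaate".toList "raajaa".toList _ (by decide) (by decide) (pvNP _ _ _ (by decide))]

theorem pvKey6 (x : List Char) : pvCompA ("bulate".toList ++ x) = "bulaate".toList ++ pvCompA x := by
  unfold pvCompA
  rw [pvRep_append "kise".toList "kisse".toList "bulate".toList _ (by decide) (by decide) (pvNP _ _ _ (by decide))]
  rw [pvRep_append "kon".toList "kaun".toList "bulate".toList _ (by decide) (by decide) (pvNP _ _ _ (by decide))]
  rw [pvRep_append "kehte".toList "kehtey".toList "bulate".toList _ (by decide) (by decide) (pvNP _ _ _ (by decide))]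
  rw [pvRep_append "kyun".toList "kyon".toList "bulate".toList _ (by decide) (by decide) (pvNP _ _ _ (by decide))]
  rw [pvRep_append "raja".toList "raajaa".toList "bulate".toList _ (by decide) (by decide) (pvNP _ _ _ (by decide))]
  rw [pvRep_pos "bulate".toList "bulaate".toList _ (by decide)]

theorem pvMain : ∀ t : List Char, pvCompA t = pvScanB t := by
  suffices H : ∀ n (t : List Char), t.length ≤ n → pvCompA t = pvScanB t from
    fun t => H t.length t le_rfl
  intro n
  induction n with
  | zero =>
    intro t ht
    have : t = [] := List.eq_nil_of_length_eq_zero (Nat.le_zero.1 ht)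
    subst this
    simp [pvCompA, pvRep, pvScanB]
  | succ n ih =>
    intro t ht
    cases t with
    | nil => simp [pvCompA, pvRep, pvScanB]
    | cons c t2 =>
      simp only [List.length_cons] at ht
      by_cases h1 : "kise".toList.isPrefixOf (c :: t2) = true
      · obtain ⟨rest, hrest⟩ := List.isPrefixOf_iff_prefix.1 h1
        rw [pvScanB, if_pos h1]
        have ht2 : List.drop 3 t2 = rest := by
          have h' := hrest
          rw [show "kise".toList = (['k','i','s','e'] : List Char) from by decide] at h'
          simp only [List.cons_append, List.nil_append] at h'
          injection h' with hc htt
          rw [← htt]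
          rfl
        rw [ht2, ← hrest]
        rw [pvKey1 rest]
        have hle : rest.length ≤ n := by
          rw [← ht2]
          simp only [List.length_drop]
          omega
        exact congrArg _ (ih rest hle)
      by_cases h2 : "kon".toList.isPrefixOf (c :: t2) = true
      · obtain ⟨rest, hrest⟩ := List.isPrefixOf_iff_prefix.1 h2
        rw [pvScanB, if_neg h1, if_pos h2]
        have ht2 : List.drop 2 t2 = rest := by
          have h' := hrest
          rw [show "kon".toList = (['k','o','n'] : List Char) from by decide] at h'
          simp only [List.cons_append, List.nil_append] at h'
          injection h' with hc htt
          rw [← htt]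
          rfl
        rw [ht2, ← hrest]
        rw [pvKey2 rest]
        have hle : rest.length ≤ n := by
          rw [← ht2]
          simp only [List.length_drop]
          omega
        exact congrArg _ (ih rest hle)
      by_cases h3 : "kehte".toList.isPrefixOf (c :: t2) = true
      · obtain ⟨rest, hrest⟩ := List.isPrefixOf_iff_prefix.1 h3
        rw [pvScanB, if_neg h1, if_neg h2, if_pos h3]
        have ht2 : List.drop 4 t2 = rest := by
          have h' := hrest
          rw [show "kehte".toList = (['k','e','h','t','e'] : List Char) from by decide] at h'
          simp only [List.cons_append, List.nil_append] at h'
          injection h' with hc htt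
          rw [← htt]
          rfl
        rw [ht2, ← hrest]
        rw [pvKey3 rest]
        have hle : rest.length ≤ n := by
          rw [← ht2]
          simp only [List.length_drop]
          omega
        exact congrArg _ (ih rest hle)
      by_cases h4 : "kyun".toList.isPrefixOf (c :: t2) = true
      · obtain ⟨rest, hrest⟩ := List.isPrefixOf_iff_prefix.1 h4
        rw [pvScanB, if_neg h1, if_neg h2, if_neg h3, if_pos h4]
        have ht2 : List.drop 3 t2 = rest := by
          have h' := hrest
          rw [show "kyun".toList = (['k','y','u','n'] : List Char) from by decide] at h'
          simp only [List.cons_append, List.nil_append] at h'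
          injection h' with hc htt
          rw [← htt]
          rfl
        rw [ht2, ← hrest]
        rw [pvKey4 rest]
        have hle : rest.length ≤ n := by
          rw [← ht2]
          simp only [List.length_drop]
          omega
        exact congrArg _ (ih rest hle)
      by_cases h5 : "raja".toList.isPrefixOf (c :: t2) = true
      · obtain ⟨rest, hrest⟩ := List.isPrefixOf_iff_prefix.1 h5
        rw [pvScanB, if_neg h1, if_neg h2, if_neg h3, if_neg h4, if_pos h5]
        have ht2 : List.drop 3 t2 = rest := by
          have h' := hrest
          rw [show "raja".toList = (['r','a','j','a'] : List Char) from by decide] at h'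
          simp only [List.cons_append, List.nil_append] at h'
          injection h' with hc htt
          rw [← htt]
          rfl
        rw [ht2, ← hrest]
        rw [pvKey5 rest]
        have hle : rest.length ≤ n := by
          rw [← ht2]
          simp only [List.length_drop]
          omega
        exact congrArg _ (ih rest hle)
      by_cases h6 : "bulate".toList.isPrefixOf (c :: t2) = true
      · obtain ⟨rest, hrest⟩ := List.isPrefixOf_iff_prefix.1 h6
        rw [pvScanB, if_neg h1, if_neg h2, if_neg h3, if_neg h4, if_neg h5, if_pos h6]
        have ht2 : List.drop 5 t2 = rest := by
          have h' := hrest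
          rw [show "bulate".toList = (['b','u','l','a','t','e'] : List Char) from by decide] at h'
          simp only [List.cons_append, List.nil_append] at h'
          injection h' with hc htt
          rw [← htt]
          rfl
        rw [ht2, ← hrest]
        rw [pvKey6 rest]
        have hle : rest.length ≤ n := by
          rw [← ht2]
          simp only [List.length_drop]
          omega
        exact congrArg _ (ih rest hle)
      rw [pvScanB, if_neg h1, if_neg h2, if_neg h3, if_neg h4, if_neg h5, if_neg h6]
      have f1 : "kise".toList.isPrefixOf (c :: t2) = false := by
        revert h1
        cases "kise".toList.isPrefixOf (c :: t2) <;> simp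
      have f2 : "kon".toList.isPrefixOf (c :: t2) = false := by
        revert h2
        cases "kon".toList.isPrefixOf (c :: t2) <;> simp
      have f3 : "kehte".toList.isPrefixOf (c :: t2) = false := by
        revert h3
        cases "kehte".toList.isPrefixOf (c :: t2) <;> simp
      have f4 : "kyun".toList.isPrefixOf (c :: t2) = false := by
        revert h4
        cases "kyun".toList.isPrefixOf (c :: t2) <;> simp
      have f5 : "raja".toList.isPrefixOf (c :: t2) = false := by
        revert h5
        cases "raja".toList.isPrefixOf (c :: t2) <;> simp
      have f6 : "bulate".toList.isPrefixOf (c :: t2) = false := by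
        revert h6
        cases "bulate".toList.isPrefixOf (c :: t2) <;> simp
      unfold pvCompA
      rw [pvRep_neg _ _ _ _ f1]
      have g2 : "kon".toList.isPrefixOf (c :: (pvRep "kise".toList "kisse".toList t2)) = false :=
        pvStep _ c _ t2 (by decide) (fun hh => (pvRep_reflect "kise".toList "kisse".toList (by decide) (by decide) t2 _ (by decide) hh)) f2
      rw [pvRep_neg _ _ _ _ g2]
      have g3 : "kehte".toList.isPrefixOf (c :: (pvRep "kon".toList "kaun".toList (pvRep "kise".toList "kisse".toList t2))) = false :=
        pvStep _ c _ t2 (by decide) (fun hh => (pvRep_reflect "kise".toList "kisse".toList (by decide) (by decide) t2 _ (by decide) (pvRep_reflect "kon".toList "kaun".toList (by decide) (by decide) (pvRep "kise".toList "kisse".toList t2) _ (by decide) hh))) f3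
      rw [pvRep_neg _ _ _ _ g3]
      have g4 : "kyun".toList.isPrefixOf (c :: (pvRep "kehte".toList "kehtey".toList (pvRep "kon".toList "kaun".toList (pvRep "kise".toList "kisse".toList t2)))) = false :=
        pvStep _ c _ t2 (by decide) (fun hh => (pvRep_reflect "kise".toList "kisse".toList (by decide) (by decide) t2 _ (by decide) (pvRep_reflect "kon".toList "kaun".toList (by decide) (by decide) (pvRep "kise".toList "kisse".toList t2) _ (by decide) (pvRep_reflect "kehte".toList "kehtey".toList (by decide) (by decide) (pvRep "kon".toList "kaun".toList (pvRep "kise".toList "kisse".toList t2)) _ (by decide) hh)))) f4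
      rw [pvRep_neg _ _ _ _ g4]
      have g5 : "raja".toList.isPrefixOf (c :: (pvRep "kyun".toList "kyon".toList (pvRep "kehte".toList "kehtey".toList (pvRep "kon".toList "kaun".toList (pvRep "kise".toList "kisse".toList t2))))) = false :=
        pvStep _ c _ t2 (by decide) (fun hh => (pvRep_reflect "kise".toList "kisse".toList (by decide) (by decide) t2 _ (by decide) (pvRep_reflect "kon".toList "kaun".toList (by decide) (by decide) (pvRep "kise".toList "kisse".toList t2) _ (by decide) (pvRep_reflect "kehte".toList "kehtey".toList (by decide) (by decide) (pvRep "kon".toList "kaun".toList (pvRep "kise".toList "kisse".toList t2)) _ (by decide) (pvRep_reflect "kyun".toList "kyon".toList (by decide) (by decide) (pvRep "kehte".toList "kehtey".toList (pvRep "kon".toList "kaun".toList (pvRep "kise".toList "kisse".toList t2))) _ (by decide) hh))))) f5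
      rw [pvRep_neg _ _ _ _ g5]
      have g6 : "bulate".toList.isPrefixOf (c :: (pvRep "raja".toList "raajaa".toList (pvRep "kyun".toList "kyon".toList (pvRep "kehte".toList "kehtey".toList (pvRep "kon".toList "kaun".toList (pvRep "kise".toList "kisse".toList t2)))))) = false :=
        pvStep _ c _ t2 (by decide) (fun hh => (pvRep_reflect "kise".toList "kisse".toList (by decide) (by decide) t2 _ (by decide) (pvRep_reflect "kon".toList "kaun".toList (by decide) (by decide) (pvRep "kise".toList "kisse".toList t2) _ (by decide) (pvRep_reflect "kehte".toList "kehtey".toList (by decide) (by decide) (pvRep "kon".toList "kaun".toList (pvRep "kise".toList "kisse".toList t2)) _ (by decide) (pvRep_reflect "kyun".toList "kyon".toList (by decide) (by decide) (pvRep "kehte".toList "kehtey".toList (pvRep "kon".toList "kaun".toList (pvRep "kise".toList "kisse".toList t2))) _ (by decide) (pvRep_reflect "raja".toList "raajaa".toList (by decide) (by decide) (pvRep "kyun".toList "kyon".toList (pvRep "kehte".toList "kehtey".toList (pvRep "kon".toList "kaun".toList (pvRep "kise".toList "kisse".toList t2)))) _ (by decide) hh)))))) f6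
      rw [pvRep_neg _ _ _ _ g6]
      have hmain := ih t2 (by omega)
      unfold pvCompA at hmain
      rw [hmain]


theorem pvA_chars (text : String) :
    normalize_for_tts text = String.ofList (pvCompA (PySem.Chars.lower text.toList)) := by
  unfold normalize_for_tts pvCompA
  have hitems : (PySem.Dict.ofList
      [("kise", "kisse"), ("kon", "kaun"), ("kehte", "kehtey"),
       ("kyun", "kyon"), ("raja", "raajaa"), ("bulate", "bulaate")] :
      PySem.Dict String String).items =
      [("kise", "kisse"), ("kon", "kaun"), ("kehte", "kehtey"),
       ("kyun", "kyon"), ("raja", "raajaa"), ("bulate", "bulaate")] := rfl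
  show List.foldl (fun out kv => PySem.Str.replace out kv.1 kv.2) (PySem.Str.lower text)
      (PySem.Dict.ofList
        [("kise", "kisse"), ("kon", "kaun"), ("kehte", "kehtey"),
         ("kyun", "kyon"), ("raja", "raajaa"), ("bulate", "bulaate")] :
        PySem.Dict String String).items = _
  rw [hitems]
  simp only [List.foldl_cons, List.foldl_nil]
  simp only [PySem.Str.replace, PySem.Str.lower, String.toList_ofList]
  rw [pvReplace_eq_rep _ _ _ (by decide), pvReplace_eq_rep _ _ _ (by decide),
    pvReplace_eq_rep _ _ _ (by decide), pvReplace_eq_rep _ _ _ (by decide),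
    pvReplace_eq_rep _ _ _ (by decide), pvReplace_eq_rep _ _ _ (by decide)]

-- ===== VERDICT (by name: the statement is the Claim_ definition above) =====
theorem normalize_for_tts_spec : Claim_equal_normalize_for_tts := by
  unfold Claim_equal_normalize_for_tts
  intro text _
  unfold Spec_normalize_for_tts normalize_for_tts_alt
  rw [pvA_chars, pvMain]
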